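-- pv_equiv track=rewrite | github.com/neoneye/PlanExe | planexe/viability/overall_summary1.py | _confidence_from_statuses
-- ===== SOURCE A (Python) =====
-- from typing import Any, Dict, Iterable, List, Optional, Sequence, Tuple
--
-- def _confidence_from_statuses(statuses: Sequence[str]) -> str:
--     normalized = [status.upper() for status in statuses]
--     if any(status == "RED" for status in normalized):
--         return "Low"
--     if any(status == "GRAY" for status in normalized):
--         return "Low"
--     if any(status == "YELLOW" for status in normalized):
--         return "Medium"
--     return "High"
-- ===== SOURCE B (Python) =====
-- def _confidence_from_statuses(statuses):
--     sev = {"RED": 3, "GRAY": 3, "YELLOW": 2}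
--     worst = max((sev.get(status.upper(), 1) for status in statuses), default=1)
--     return {3: "Low", 2: "Medium", 1: "High"}[worst]
-- ===== Notes on version B (the rewrite author's own statement) =====
-- stated objective: simpler
-- what changed: Replaces the three short-circuit any-scans over a normalized copy with one max-reduction over a severity table (RED/GRAY=3, YELLOW=2, else 1) followed by a single lookup of the worst severity.
import Mathlib
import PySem

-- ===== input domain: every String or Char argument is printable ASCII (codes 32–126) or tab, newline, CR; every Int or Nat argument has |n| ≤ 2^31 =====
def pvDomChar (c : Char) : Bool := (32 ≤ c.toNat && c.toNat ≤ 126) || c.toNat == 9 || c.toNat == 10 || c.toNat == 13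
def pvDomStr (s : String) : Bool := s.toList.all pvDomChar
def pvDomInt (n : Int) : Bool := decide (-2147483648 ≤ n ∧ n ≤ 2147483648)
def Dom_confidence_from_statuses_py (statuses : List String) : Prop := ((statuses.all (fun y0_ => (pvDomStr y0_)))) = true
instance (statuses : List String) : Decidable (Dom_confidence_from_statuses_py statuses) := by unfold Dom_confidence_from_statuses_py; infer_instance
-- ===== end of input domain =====

-- B replaces A's three short-circuit any-scans with one max-reduction over a severity table plus a final lookup (objective: simpler).

-- ===== PORT A =====
def confidence_from_statuses_py (statuses : List String) : String :=
  let normalized := statuses.map (fun status => PySem.Str.upper status)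
  if normalized.any (fun status => status == "RED") then "Low"
  else if normalized.any (fun status => status == "GRAY") then "Low"
  else if normalized.any (fun status => status == "YELLOW") then "Medium"
  else "High"

-- ===== PORT B =====
def pvSev : PySem.Dict String Int :=
  ((PySem.Dict.empty.insert "RED" 3).insert "GRAY" 3).insert "YELLOW" 2

def confidence_from_statuses_py_alt (statuses : List String) : String :=
  -- max(gen, default=1): fold of max with start 1
  let worst := statuses.foldl (fun acc status => max acc (pvSev.getD (PySem.Str.upper status) 1)) 1
  -- {3: "Low", 2: "Medium", 1: "High"}[worst]
  if worst == 3 then "Low" else if worst == 2 then "Medium" else "High"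

-- ===== PRECONDITION & SPEC =====
def Spec_confidence_from_statuses_py (statuses : List String) (out : String) : Prop := out = confidence_from_statuses_py_alt statuses
instance (statuses : List String) (out : String) : Decidable (Spec_confidence_from_statuses_py statuses out) := by unfold Spec_confidence_from_statuses_py; infer_instance

-- ===== CLAIM (what is proved, stated in full; the proofs are below) =====
def Claim_equal_confidence_from_statuses_py : Prop := ∀ (statuses : List String), Dom_confidence_from_statuses_py statuses → Spec_confidence_from_statuses_py statuses (confidence_from_statuses_py statuses)

-- ===== LEMMAS AND PROOFS =====

lemma pvSev_getD (s : String) :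
    pvSev.getD s 1 =
      (if s = "YELLOW" then 2 else if s = "GRAY" then 3 else if s = "RED" then 3 else 1) := by
  simp [pvSev, PySem.Dict.getD_insert, PySem.Dict.getD_empty]

lemma worst_foldl (l : List String) (acc : Int) (h : 1 ≤ acc) (h3 : acc ≤ 3) :
    l.foldl (fun a status => max a (pvSev.getD (PySem.Str.upper status) 1)) acc =
      max acc
        (if l.any (fun s => PySem.Str.upper s == "RED" || PySem.Str.upper s == "GRAY") then 3
         else if l.any (fun s => PySem.Str.upper s == "YELLOW") then 2 else 1) := by
  induction l generalizing acc with
  | nil => simp; omega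
  | cons x xs ih =>
      simp only [List.foldl_cons, List.any_cons]
      rw [ih (max acc (pvSev.getD (PySem.Str.upper x) 1)) (by rw [pvSev_getD]; split_ifs <;> omega)
        (by rw [pvSev_getD]; split_ifs <;> omega)]
      rw [pvSev_getD]
      by_cases e1 : PySem.Str.upper x = "RED" <;> by_cases e2 : PySem.Str.upper x = "GRAY" <;>
        by_cases e3 : PySem.Str.upper x = "YELLOW" <;>
          simp [e1, e2, e3] <;> split_ifs <;> omega

-- ===== VERDICT (by name: the statement is the Claim_ definition above) =====
theorem confidence_from_statuses_py_spec : Claim_equal_confidence_from_statuses_py := by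
  intro statuses _
  show confidence_from_statuses_py statuses = confidence_from_statuses_py_alt statuses
  unfold confidence_from_statuses_py confidence_from_statuses_py_alt
  rw [worst_foldl statuses 1 (by omega) (by omega)]
  simp only [List.any_map, List.any_eq_true, Bool.or_eq_true, beq_iff_eq, Function.comp]
  have hsplit : (∃ x ∈ statuses, PySem.Str.upper x = "RED" ∨ PySem.Str.upper x = "GRAY") ↔
      ((∃ x ∈ statuses, PySem.Str.upper x = "RED") ∨ (∃ x ∈ statuses, PySem.Str.upper x = "GRAY")) := by
    constructor
    · rintro ⟨x, hx, h | h⟩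
      · exact Or.inl ⟨x, hx, h⟩
      · exact Or.inr ⟨x, hx, h⟩
    · rintro (⟨x, hx, h⟩ | ⟨x, hx, h⟩)
      · exact ⟨x, hx, Or.inl h⟩
      · exact ⟨x, hx, Or.inr h⟩
  simp only [hsplit]
  by_cases hR : ∃ x ∈ statuses, PySem.Str.upper x = "RED" <;>
    by_cases hG : ∃ x ∈ statuses, PySem.Str.upper x = "GRAY" <;>
      by_cases hY : ∃ x ∈ statuses, PySem.Str.upper x = "YELLOW" <;>
        simp [hR, hG, hY]
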